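-- pv_equiv track=rewrite | github.com/rlei/adventofcode2023 | day13/prob2.py | find_reflect_line
-- ===== SOURCE A (Python) =====
-- def find_reflect_line(patterns: list[str], old: (int | None)) -> (int | None):
--   for row in range(1, len(patterns)):
--     part1 = list(reversed(patterns[:row]))
--     part2 = patterns[row:]
--     min_lines = min(row, len(patterns) - row)
--     if part1[:min_lines] == part2[:min_lines] and row != old:
--       return row
--   return None
-- ===== SOURCE B (Python) =====
-- def find_reflect_line(patterns: list[str], old: (int | None)) -> (int | None):
--   n = len(patterns)
--   for row in range(1, n):
--     min_lines = min(row, n - row)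
--     i = 0
--     ok = True
--     while i < min_lines:
--       if patterns[row - 1 - i] != patterns[row + i]:
--         ok = False
--         break
--       i += 1
--     if ok and row != old:
--       return row
--   return None
-- ===== Notes on version B (the rewrite author's own statement) =====
-- stated objective: alternative
-- what changed: Replaces per-row reversed/sliced list construction and slice comparison with direct index pairing (patterns[row-1-i] vs patterns[row+i]) and early exit on first mismatch, allocating nothing.
import Mathlib
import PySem

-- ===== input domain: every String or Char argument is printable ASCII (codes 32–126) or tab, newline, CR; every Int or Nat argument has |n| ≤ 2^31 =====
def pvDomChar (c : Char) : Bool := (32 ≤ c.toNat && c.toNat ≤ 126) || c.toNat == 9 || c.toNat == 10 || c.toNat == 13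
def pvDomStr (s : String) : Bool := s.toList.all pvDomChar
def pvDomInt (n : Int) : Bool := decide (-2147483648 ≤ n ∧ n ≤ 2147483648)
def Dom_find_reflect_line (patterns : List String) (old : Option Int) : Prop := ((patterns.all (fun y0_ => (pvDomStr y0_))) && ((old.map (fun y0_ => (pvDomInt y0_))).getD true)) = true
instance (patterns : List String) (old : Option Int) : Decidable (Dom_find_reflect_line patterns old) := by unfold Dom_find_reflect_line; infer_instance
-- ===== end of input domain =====

-- B replaces A's per-row reversed/sliced list construction by direct index pairing with early exit (objective: alternative).
-- ===== PORT A =====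
def goA (patterns : List String) (old : Option Int) : List Int → Option Int
  | [] => none
  | row :: rest =>
    let part1 := (PySem.List.slice patterns none (some row)).reverse
    let part2 := PySem.List.slice patterns (some row) none
    let min_lines : Int := min row ((patterns.length : Int) - row)
    if PySem.List.slice part1 none (some min_lines) = PySem.List.slice part2 none (some min_lines)
        ∧ old ≠ some row
    then some row else goA patterns old rest

def find_reflect_line (patterns : List String) (old : Option Int) : Option Int :=
  goA patterns old (PySem.List.pyRange 1 (patterns.length : Int) 1)

-- ===== PORT B =====
-- inner while-loop of Source B: compare patterns[row-1-i] with patterns[row+i], early exit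
def innerB (patterns : List String) (row : Int) : Nat → Int → Bool
  | 0, _ => true
  | k+1, i =>
    if PySem.List.pyGet? patterns (row - 1 - i) = PySem.List.pyGet? patterns (row + i)
    then innerB patterns row k (i + 1) else false

def goB (patterns : List String) (old : Option Int) (n : Int) : Nat → Int → Option Int
  | 0, _ => none
  | k+1, row =>
    let min_lines : Int := min row (n - row)
    if innerB patterns row min_lines.toNat 0 = true ∧ old ≠ some row
    then some row else goB patterns old n k (row + 1)

def find_reflect_line_alt (patterns : List String) (old : Option Int) : Option Int :=
  goB patterns old (patterns.length : Int) (patterns.length - 1) 1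

-- ===== PRECONDITION & SPEC =====
def Spec_find_reflect_line (patterns : List String) (old : Option Int) (out : Option Int) : Prop := out = find_reflect_line_alt patterns old
instance (patterns : List String) (old : Option Int) (out : Option Int) : Decidable (Spec_find_reflect_line patterns old out) := by unfold Spec_find_reflect_line; infer_instance

-- ===== CLAIM (what is proved, stated in full; the proofs are below) =====
def Claim_equal_find_reflect_line : Prop := ∀ (patterns : List String) (old : Option Int), Dom_find_reflect_line patterns old → Spec_find_reflect_line patterns old (find_reflect_line patterns old)

-- ===== LEMMAS AND PROOFS =====

-- innerB is true iff every index pair up to the fuel matches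
theorem innerB_iff (patterns : List String) (row : Int) (k : Nat) (i : Int) :
    innerB patterns row k i = true ↔
      ∀ j : Nat, j < k →
        PySem.List.pyGet? patterns (row - 1 - (i + j)) = PySem.List.pyGet? patterns (row + (i + j)) := by
  induction k generalizing i with
  | zero => simp [innerB]
  | succ k ih =>
    simp only [innerB]
    split_ifs with h
    · rw [ih]
      constructor
      · intro H j hj
        cases j with
        | zero => simpa using h
        | succ j =>
          have := H j (by omega)
          convert this using 3 <;> push_cast <;> ring
      · intro H j hj
        have := H (j + 1) (by omega)
        convert this using 3 <;> push_cast <;> ring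
    · simp only [false_iff]
      intro H
      exact h (by simpa using H 0 (by omega))

-- the per-row tests of A and B are equivalent
theorem cond_equiv (patterns : List String) (r : Nat) (h1 : 1 ≤ r) (h2 : r < patterns.length) :
    (PySem.List.slice ((PySem.List.slice patterns none (some (r : Int))).reverse) none
        (some (min (r : Int) ((patterns.length : Int) - r))) =
      PySem.List.slice (PySem.List.slice patterns (some (r : Int)) none) none
        (some (min (r : Int) ((patterns.length : Int) - r)))) ↔
      innerB patterns (r : Int) (min (r : Int) ((patterns.length : Int) - r)).toNat 0 = true := by
  set m : Nat := min r (patterns.length - r) with hm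
  have hmint : (min (r : Int) ((patterns.length : Int) - r)) = (m : Int) := by
    simp only [hm]; omega
  rw [hmint]
  simp only [PySem.List.slice_to_natCast, PySem.List.slice_from_natCast]
  rw [innerB_iff]
  have hmr : m ≤ r := by omega
  have hmd : m ≤ patterns.length - r := by omega
  have htoNat : ((m : Int)).toNat = m := by omega
  rw [htoNat]
  have idx : ∀ j : Nat, j < m →
      (PySem.List.pyGet? patterns ((r : Int) - 1 - (0 + j)) = patterns[r - 1 - j]?
       ∧ PySem.List.pyGet? patterns ((r : Int) + (0 + j)) = patterns[r + j]?) := by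
    intro j hj
    constructor
    · rw [PySem.List.pyGet?_of_nonneg _ (by omega : (0:Int) ≤ (r:Int) - 1 - (0 + j))]
      rw [show ((r:Int) - 1 - (0 + j)).toNat = r - 1 - j by omega]
    · rw [PySem.List.pyGet?_of_nonneg _ (by omega : (0:Int) ≤ (r:Int) + (0 + j))]
      rw [show ((r:Int) + (0 + j)).toNat = r + j by omega]
  constructor
  · intro H j hj
    obtain ⟨e1, e2⟩ := idx j hj
    rw [e1, e2, List.getElem?_eq_getElem (by omega : r - 1 - j < patterns.length),
        List.getElem?_eq_getElem (by omega : r + j < patterns.length), Option.some_inj]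
    have := congrArg (fun l => l[j]?) H
    simp only [List.getElem?_take, hj, if_pos] at this
    rw [List.getElem?_eq_getElem (by simp [List.length_take]; omega :
          j < (patterns.take r).reverse.length),
        List.getElem?_eq_getElem (by simp [List.length_drop]; omega :
          j < (patterns.drop r).length), Option.some_inj] at this
    rw [List.getElem_reverse, List.getElem_take, List.getElem_drop] at this
    convert this using 2
    simp [List.length_take]; omega
  · intro H
    apply List.ext_getElem
    · simp [List.length_take, List.length_drop]; omega
    · intro j hja hjb
      have hj : j < m := by
        simp [List.length_take] at hja; omega
      obtain ⟨e1, e2⟩ := idx j hj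
      have := H j hj
      rw [e1, e2, List.getElem?_eq_getElem (by omega : r - 1 - j < patterns.length),
          List.getElem?_eq_getElem (by omega : r + j < patterns.length), Option.some_inj] at this
      simp only [List.getElem_take, List.getElem_reverse, List.getElem_drop]
      convert this using 2
      simp [List.length_take]; omega

-- main loop correspondence
theorem go_eq (patterns : List String) (old : Option Int) (k r : Nat)
    (hr : 1 ≤ r) (hk : k + r = patterns.length) :
    goA patterns old (PySem.List.pyRange (r : Int) (patterns.length : Int) 1) =
      goB patterns old (patterns.length : Int) k (r : Int) := by
  induction k generalizing r with
  | zero =>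
    rw [PySem.List.pyRange_one_eq_nil (by omega : (patterns.length : Int) ≤ (r : Int))]
    rfl
  | succ k ih =>
    have hlt : (r : Int) < (patterns.length : Int) := by exact_mod_cast (by omega : r < patterns.length)
    rw [PySem.List.pyRange_one_cons hlt]
    simp only [goA, goB]
    rw [show ((r:Int) + 1) = ((r + 1 : Nat) : Int) by push_cast; ring]
    rw [ih (r + 1) (by omega) (by omega)]
    have hc := cond_equiv patterns r hr (by omega)
    simp only [hc]

-- ===== VERDICT (by name: the statement is the Claim_ definition above) =====
theorem find_reflect_line_spec : Claim_equal_find_reflect_line := by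
  intro patterns old _
  unfold Spec_find_reflect_line find_reflect_line find_reflect_line_alt
  rcases patterns with _ | ⟨p, ps⟩
  · rfl
  · exact go_eq (p :: ps) old (p :: ps).length.pred 1 le_rfl (by simp)
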